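-- pv_equiv track=rewrite | github.com/AndrewS-hash/pyFiddle | pyFiddle_Intermediate.py | divisible_by_digits
-- ===== SOURCE A (Python) =====
-- def divisible_by_digits(startnum: int, endnum: int) -> list:
--     """
--     Find numbers in the given range [startnum, endnum] that are divisible by every non-zero digit they contain.
--
--     Args:
--     startnum (int): The starting number of the range.
--     endnum (int): The ending number of the range.
--
--     Returns:
--     list: A list of numbers satisfying the condition.
--     """
--     value = []
--     for i in range(startnum, endnum + 1):  # Include endnum, so use endnum + 1
--         num_str = str(i)
--         divisible = True
--
--         # Check each digit in the number
--         for digit in num_str: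
--             digit_int = int(digit)
--             if digit_int != 0 and i % digit_int != 0:  # If it's non-zero and not divisible
--                 divisible = False
--                 break
--
--         # Exclude numbers with zero digits, they should not be included
--         if divisible and '0' not in num_str:
--             value.append(i)
--
--     return value
-- ===== SOURCE B (Python) =====
-- def _gcd(a, b):
--     while b:
--         a, b = b, a % b
--     return a
--
-- def divisible_by_digits(startnum: int, endnum: int) -> list:
--     result = []
--     for i in range(startnum, endnum + 1):
--         digits = [int(c) for c in str(i)]
--         if 0 in digits:
--             continue
--         lcm = 1
--         for d in digits:
--             lcm = lcm * d // _gcd(lcm, d)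
--         if i % lcm == 0:
--             result.append(i)
--     return result
-- ===== Notes on version B (the rewrite author's own statement) =====
-- stated objective: alternative
-- what changed: B replaces A's per-digit modulo loop with early break by folding the digits into a running LCM (Euclid's gcd) and doing a single divisibility test i % lcm == 0, skipping zero-digit numbers up front.
import Mathlib
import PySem

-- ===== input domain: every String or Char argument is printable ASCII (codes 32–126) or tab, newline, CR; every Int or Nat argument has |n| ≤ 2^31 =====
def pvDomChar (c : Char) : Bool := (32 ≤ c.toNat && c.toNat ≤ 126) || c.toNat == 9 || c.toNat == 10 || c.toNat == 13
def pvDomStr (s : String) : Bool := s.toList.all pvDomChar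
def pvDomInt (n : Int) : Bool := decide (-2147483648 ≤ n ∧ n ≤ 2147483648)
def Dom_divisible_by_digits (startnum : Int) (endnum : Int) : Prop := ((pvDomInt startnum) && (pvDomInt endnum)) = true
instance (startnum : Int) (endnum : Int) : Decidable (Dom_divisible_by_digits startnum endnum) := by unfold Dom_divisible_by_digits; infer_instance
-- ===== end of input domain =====

-- B replaces A's per-digit modulo loop with one divisibility test against the running LCM of the
-- digits (Euclid's gcd), skipping numbers that contain a '0' digit; objective: alternative.

-- int(c) for a single character c, shared by both ports (Python's int(digit))
def digitVal (c : Char) : Int := (PySem.Int.ofChars? [c]).getD 0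

-- ===== PORT A =====
-- A's inner 'for digit in num_str' loop with its early break
def digitLoop (i : Int) : List Char → Bool
  | [] => true
  | c :: rest =>
    if digitVal c ≠ 0 ∧ PySem.Int.mod i (digitVal c) ≠ 0 then false else digitLoop i rest

def divisible_by_digits (startnum : Int) (endnum : Int) : List Int :=
  (PySem.List.pyRange startnum (endnum + 1) 1).foldl
    (fun value i =>
      if digitLoop i (PySem.Int.toChars i) = true ∧ '0' ∉ PySem.Int.toChars i
      then value ++ [i] else value)
    []

-- ===== PORT B =====
-- Euclid's gcd (Source B's _gcd); terminates because |a % b| < |b|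
theorem pyMod_natAbs_lt (a b : Int) (h : ¬ b = 0) :
    (PySem.Int.mod a b).natAbs < b.natAbs := by
  rcases lt_or_gt_of_ne h with hb | hb
  · have h1 := PySem.Int.mod_neg_bounds a hb
    omega
  · have h1 := PySem.Int.mod_nonneg a hb
    have h2 := PySem.Int.mod_lt a hb
    omega

def pyGcd (a b : Int) : Int :=
  if h : b = 0 then a else pyGcd b (PySem.Int.mod a b)
termination_by b.natAbs
decreasing_by exact pyMod_natAbs_lt a b h

-- one step 'lcm = lcm * d // _gcd(lcm, d)'
def lcmStep (l d : Int) : Int := PySem.Int.floordiv (l * d) (pyGcd l d)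

def divisible_by_digits_alt (startnum : Int) (endnum : Int) : List Int :=
  (PySem.List.pyRange startnum (endnum + 1) 1).foldl
    (fun result i =>
      let digits := (PySem.Int.toChars i).map digitVal
      if 0 ∈ digits then result
      else if PySem.Int.mod i (digits.foldl lcmStep 1) = 0 then result ++ [i] else result)
    []

-- ===== PRECONDITION & SPEC =====
-- Pre_ excludes only inputs where A raises: a nonempty range starting below 0 makes
-- int('-') raise ValueError on the first iteration.
def Pre_divisible_by_digits (startnum : Int) (endnum : Int) : Prop :=
  0 ≤ startnum ∨ endnum < startnum
instance (startnum : Int) (endnum : Int) : Decidable (Pre_divisible_by_digits startnum endnum) := by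
  unfold Pre_divisible_by_digits; infer_instance

def pvWitness_divisible_by_digits : Int × Int := (1, 25)

def Spec_divisible_by_digits (startnum : Int) (endnum : Int) (out : List Int) : Prop := out = divisible_by_digits_alt startnum endnum
instance (startnum : Int) (endnum : Int) (out : List Int) : Decidable (Spec_divisible_by_digits startnum endnum out) := by unfold Spec_divisible_by_digits; infer_instance

-- ===== CLAIM (what is proved, stated in full; the proofs are below) =====
def Claim_equal_divisible_by_digits : Prop := ∀ (startnum : Int) (endnum : Int), Dom_divisible_by_digits startnum endnum → Pre_divisible_by_digits startnum endnum → Spec_divisible_by_digits startnum endnum (divisible_by_digits startnum endnum)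

-- ===== LEMMAS AND PROOFS =====

-- every character emitted by Nat.toDigitsCore base 10 is a digit character
theorem mem_toDigitsCore_ten (f : Nat) : ∀ (n : Nat) (ds : List Char), ∀ c ∈ Nat.toDigitsCore 10 f n ds,
    (∃ k, k < 10 ∧ c = Nat.digitChar k) ∨ c ∈ ds := by
  induction f with
  | zero => intro n ds c hc; exact Or.inr hc
  | succ f ih =>
    intro n ds c hc
    simp only [Nat.toDigitsCore] at hc
    by_cases h : n / 10 = 0
    · rw [if_pos h] at hc
      rcases List.mem_cons.mp hc with h1 | h1
      · exact Or.inl ⟨n % 10, Nat.mod_lt _ (by omega), h1⟩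
      · exact Or.inr h1
    · rw [if_neg h] at hc
      rcases ih (n / 10) _ c hc with h1 | h1
      · exact Or.inl h1
      · rcases List.mem_cons.mp h1 with h2 | h2
        · exact Or.inl ⟨n % 10, Nat.mod_lt _ (by omega), h2⟩
        · exact Or.inr h2

theorem digitChar_facts (k : Nat) (hk : k < 10) :
    digitVal (Nat.digitChar k) = (k : Int) ∧ (Nat.digitChar k = '0' ↔ k = 0) := by
  interval_cases k <;> exact ⟨by decide, by decide⟩

-- every character of str(i), i ≥ 0, is a digit with value digitVal
theorem toChars_digit (i : Int) (h : 0 ≤ i) (c : Char) (hc : c ∈ PySem.Int.toChars i) :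
    ∃ k : Nat, k < 10 ∧ digitVal c = (k : Int) ∧ (c = '0' ↔ k = 0) := by
  unfold PySem.Int.toChars at hc
  rw [if_neg (by omega)] at hc
  rcases mem_toDigitsCore_ten _ _ _ c hc with ⟨k, hk, rfl⟩ | h1
  · obtain ⟨h2, h3⟩ := digitChar_facts k hk
    exact ⟨k, hk, h2, h3⟩
  · simp at h1

theorem digitVal_zero_iff (i : Int) (h : 0 ≤ i) (c : Char) (hc : c ∈ PySem.Int.toChars i) :
    digitVal c = 0 ↔ c = '0' := by
  obtain ⟨k, _, h2, h3⟩ := toChars_digit i h c hc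
  rw [h2, h3]
  omega

theorem digitLoop_iff (i : Int) (cs : List Char) :
    digitLoop i cs = true ↔ ∀ c ∈ cs, digitVal c = 0 ∨ PySem.Int.mod i (digitVal c) = 0 := by
  induction cs with
  | nil => simp [digitLoop]
  | cons c rest ih =>
    simp only [digitLoop, List.mem_cons]
    split
    · rename_i hcond
      constructor
      · intro h; cases h
      · intro h
        rcases h c (Or.inl rfl) with h1 | h1 <;> [exact absurd h1 hcond.1; exact absurd h1 hcond.2]
    · rename_i hcond
      rw [ih]
      constructor
      · intro h c' hc'
        rcases hc' with rfl | hc'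
        · by_cases hz : digitVal c' = 0
          · exact Or.inl hz
          · exact Or.inr (by_contra fun hm => hcond ⟨hz, hm⟩)
        · exact h c' hc'
      · intro h c' hc'; exact h c' (Or.inr hc')

theorem pyGcd_eq (a b : Int) (ha : 0 ≤ a) (hb : 0 ≤ b) : pyGcd a b = gcd a b := by
  induction a, b using pyGcd.induct with
  | case1 a => rw [pyGcd]; rw [← Int.coe_gcd]; simp [Int.natAbs_of_nonneg ha]
  | case2 a b h ih =>
    have hbpos : 0 < b := lt_of_le_of_ne hb (Ne.symm h)
    rw [pyGcd, dif_neg h, ih hb (PySem.Int.mod_nonneg a hbpos)]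
    rw [PySem.Int.mod_eq_emod_of_pos hbpos]
    rw [← Int.coe_gcd, ← Int.coe_gcd]
    congr 1
    have : a % b = a + (-(a / b)) * b := by rw [Int.emod_def]; ring
    rw [this, Int.gcd_add_mul_right_right, Int.gcd_comm]

theorem gcd_lcm_mul (l d : Int) (hl : 0 < l) (hd : 0 < d) : gcd l d * lcm l d = l * d := by
  have h2 := congrArg (Nat.cast : Nat → Int) (Int.gcd_mul_lcm l d)
  push_cast at h2
  rw [abs_of_pos hl, abs_of_pos hd] at h2
  rw [← Int.coe_gcd, ← Int.coe_lcm]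
  exact h2

theorem lcm_pos_int (l d : Int) (hl : 0 < l) (hd : 0 < d) : (0:Int) < lcm l d := by
  rw [← Int.coe_lcm]
  exact_mod_cast Int.lcm_pos hl.ne' hd.ne'

theorem lcmStep_eq (l d : Int) (hl : 0 < l) (hd : 0 < d) : lcmStep l d = lcm l d := by
  have hg : (0 : Int) < gcd l d := by
    rw [← Int.coe_gcd]
    exact_mod_cast Int.gcd_pos_of_ne_zero_left d hl.ne'
  unfold lcmStep
  rw [pyGcd_eq l d hl.le hd.le, PySem.Int.floordiv_eq_ediv_of_pos hg,
      ← gcd_lcm_mul l d hl hd, Int.mul_ediv_cancel_left _ hg.ne']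

theorem foldl_lcmStep_spec (ds : List Int) : ∀ l : Int, 0 < l → (∀ d ∈ ds, 0 < d) →
    0 < ds.foldl lcmStep l ∧ ∀ m : Int, (ds.foldl lcmStep l ∣ m ↔ l ∣ m ∧ ∀ d ∈ ds, d ∣ m) := by
  induction ds with
  | nil => intro l hl _; exact ⟨hl, fun m => by simp⟩
  | cons d rest ih =>
    intro l hl hds
    have hd : 0 < d := hds d (List.mem_cons_self ..)
    have hlcm : 0 < lcm l d := lcm_pos_int l d hl hd
    rw [List.foldl_cons, lcmStep_eq l d hl hd]
    obtain ⟨h1, h2⟩ := ih (lcm l d) hlcm (fun d' hd' => hds d' (List.mem_cons_of_mem _ hd'))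
    refine ⟨h1, fun m => ?_⟩
    rw [h2 m, lcm_dvd_iff]
    constructor
    · rintro ⟨⟨ha, hb⟩, hc⟩; exact ⟨ha, fun d' hd' => by rcases List.mem_cons.mp hd' with rfl | hd' <;> [exact hb; exact hc d' hd']⟩
    · rintro ⟨ha, hb⟩
      exact ⟨⟨ha, hb d (List.mem_cons_self ..)⟩, fun d' hd' => hb d' (List.mem_cons_of_mem _ hd')⟩

-- the two loop bodies agree on every i ≥ 0
theorem body_eq (i : Int) (h : 0 ≤ i) (v : List Int) :
    (if digitLoop i (PySem.Int.toChars i) = true ∧ '0' ∉ PySem.Int.toChars i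
     then v ++ [i] else v)
    = (let digits := (PySem.Int.toChars i).map digitVal
       if 0 ∈ digits then v
       else if PySem.Int.mod i (digits.foldl lcmStep 1) = 0 then v ++ [i] else v) := by
  simp only []
  have hz : (0 : Int) ∈ (PySem.Int.toChars i).map digitVal ↔ '0' ∈ PySem.Int.toChars i := by
    constructor
    · intro hm
      obtain ⟨c, hc, hval⟩ := List.mem_map.mp hm
      exact (digitVal_zero_iff i h c hc).mp hval ▸ hc
    · intro hm
      exact List.mem_map.mpr ⟨'0', hm, by decide⟩
  by_cases h0 : '0' ∈ PySem.Int.toChars i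
  · rw [if_pos (hz.mpr h0), if_neg (by tauto)]
  · rw [if_neg (fun hm => h0 (hz.mp hm))]
    have hpos : ∀ d ∈ (PySem.Int.toChars i).map digitVal, 0 < d := by
      intro d hd
      obtain ⟨c, hc, rfl⟩ := List.mem_map.mp hd
      obtain ⟨k, _, h2, h3⟩ := toChars_digit i h c hc
      have : c ≠ '0' := fun hc0 => h0 (hc0 ▸ hc)
      rw [h2]
      have : k ≠ 0 := fun h4 => this (h3.mpr h4)
      omega
    obtain ⟨_, hdvd⟩ := foldl_lcmStep_spec _ 1 one_pos hpos
    have hcond : (digitLoop i (PySem.Int.toChars i) = true ∧ '0' ∉ PySem.Int.toChars i)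
        ↔ PySem.Int.mod i (((PySem.Int.toChars i).map digitVal).foldl lcmStep 1) = 0 := by
      rw [PySem.Int.mod_eq_zero_iff_dvd, hdvd i, digitLoop_iff]
      constructor
      · rintro ⟨hall, _⟩
        refine ⟨one_dvd i, fun d hd => ?_⟩
        obtain ⟨c, hc, rfl⟩ := List.mem_map.mp hd
        rcases hall c hc with h1 | h1
        · exact absurd (hpos _ hd) (by omega)
        · exact (PySem.Int.mod_eq_zero_iff_dvd i (digitVal c)).mp h1
      · rintro ⟨_, hall⟩
        refine ⟨fun c hc => Or.inr ?_, h0⟩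
        exact (PySem.Int.mod_eq_zero_iff_dvd i (digitVal c)).mpr
          (hall _ (List.mem_map.mpr ⟨c, hc, rfl⟩))
    by_cases hA : digitLoop i (PySem.Int.toChars i) = true ∧ '0' ∉ PySem.Int.toChars i
    · rw [if_pos hA, if_pos (hcond.mp hA)]
    · rw [if_neg hA, if_neg (fun hm => hA (hcond.mpr hm))]

-- ===== VERDICT (by name: the statement is the Claim_ definition above) =====
theorem divisible_by_digits_spec : Claim_equal_divisible_by_digits := by
  intro startnum endnum _ hPre
  unfold Spec_divisible_by_digits divisible_by_digits divisible_by_digits_alt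
  rcases hPre with hs | he
  · apply PySem.List.foldl_congr_mem
    intro acc i hi
    have hi0 : 0 ≤ i := le_trans hs (PySem.List.mem_pyRange_one.mp hi).1
    exact body_eq i hi0 acc
  · rw [PySem.List.pyRange_one_eq_nil (by omega)]
    rfl
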